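-- pv_equiv track=rewrite | github.com/Leandroglez39/FlyCircuit_Experiments | src/matrix.py | calculate_kis
-- ===== SOURCE A (Python) =====
-- def calculate_kis(communities: list, neighbors: list) -> int:
--
--     suma = 0
--
--     for community in communities:
--
--             k_i_s = 0
--
--             for n in neighbors:
--
--
--                 if n in community:
--                     k_i_s += 1
--
--
--             suma += k_i_s
--
--     return suma
-- ===== SOURCE B (Python) =====
-- def calculate_kis(communities: list, neighbors: list) -> int:
--     count = {}
--     for community in communities:
--         for v in set(community):
--             count[v] = count.get(v, 0) + 1
--     return sum(count.get(n, 0) for n in neighbors)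
-- ===== Notes on version B (the rewrite author's own statement) =====
-- stated objective: faster
-- what changed: Builds a one-pass frequency table (communities containing each value) and then sums count.get(n,0) over neighbors, replacing the per-community scan of all neighbors with linear membership scans.
import Mathlib
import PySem

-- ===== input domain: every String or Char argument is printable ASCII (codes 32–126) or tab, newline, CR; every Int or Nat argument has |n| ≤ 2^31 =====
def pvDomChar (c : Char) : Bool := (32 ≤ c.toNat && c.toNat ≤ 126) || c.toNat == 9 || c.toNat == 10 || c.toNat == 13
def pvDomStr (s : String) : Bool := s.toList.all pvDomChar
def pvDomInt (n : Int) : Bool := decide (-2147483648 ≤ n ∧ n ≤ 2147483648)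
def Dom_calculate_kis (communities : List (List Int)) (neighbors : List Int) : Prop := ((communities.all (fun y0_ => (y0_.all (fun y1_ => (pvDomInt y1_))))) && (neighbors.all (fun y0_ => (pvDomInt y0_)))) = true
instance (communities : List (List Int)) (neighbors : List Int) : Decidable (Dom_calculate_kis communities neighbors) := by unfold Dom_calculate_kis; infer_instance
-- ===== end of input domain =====

-- B replaces A's per-community scan of all neighbors by a frequency table built in one
-- pass over communities plus a single pass over neighbors (objective: faster).

-- ===== PORT A =====
def calculate_kis (communities : List (List Int)) (neighbors : List Int) : Int :=
  communities.foldl (fun suma community =>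
    let k_i_s : Int :=
      neighbors.foldl (fun k_i_s n => if community.contains n then k_i_s + 1 else k_i_s) 0
    suma + k_i_s) 0

-- ===== PORT B =====
def calculate_kis_alt (communities : List (List Int)) (neighbors : List Int) : Int :=
  let count : PySem.Dict Int Int :=
    communities.foldl (fun count community =>
      (PySem.Set.ofList community).foldl (fun count v => count.modify v 0 (· + 1)) count) (PySem.Dict.empty)
  neighbors.foldl (fun s n => s + count.getD n 0) 0

-- ===== PRECONDITION & SPEC =====
def Spec_calculate_kis (communities : List (List Int)) (neighbors : List Int) (out : Int) : Prop := out = calculate_kis_alt communities neighbors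
instance (communities : List (List Int)) (neighbors : List Int) (out : Int) : Decidable (Spec_calculate_kis communities neighbors out) := by unfold Spec_calculate_kis; infer_instance

-- ===== CLAIM (what is proved, stated in full; the proofs are below) =====
def Claim_equal_calculate_kis : Prop := ∀ (communities : List (List Int)) (neighbors : List Int), Dom_calculate_kis communities neighbors → Spec_calculate_kis communities neighbors (calculate_kis communities neighbors)

-- ===== LEMMAS AND PROOFS =====

-- A's inner loop counts the neighbors lying in the community.
theorem kis_inner_eq (community : List Int) (neighbors : List Int) (a : Int) :
    neighbors.foldl (fun k n => if community.contains n then k + 1 else k) a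
      = a + (neighbors.map (fun n => if community.contains n then (1 : Int) else 0)).sum := by
  induction neighbors generalizing a with
  | nil => simp
  | cons n ns ih => simp only [List.foldl_cons, List.map_cons, List.sum_cons, ih]; split <;> ring

-- The frequency table's entry at v is the number of communities containing v.
theorem count_getD (communities : List (List Int)) (d : PySem.Dict Int Int) (v : Int) :
    (communities.foldl (fun count community =>
        (PySem.Set.ofList community).foldl (fun count w => count.modify w 0 (· + 1)) count) d).getD v 0
      = d.getD v 0 + (communities.map (fun c => if c.contains v then (1 : Int) else 0)).sum := by
  induction communities generalizing d with
  | nil => simp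
  | cons c cs ih =>
      simp only [List.foldl_cons, List.map_cons, List.sum_cons, ih,
        PySem.Dict.getD_foldl_modify_add_one]
      have hcnt : ((PySem.Set.ofList c).count v : Int) = if c.contains v then 1 else 0 := by
        by_cases h : v ∈ c
        · rw [if_pos (by simpa using h)]
          have : (PySem.Set.ofList c).count v = 1 :=
            List.count_eq_one_of_mem (PySem.Set.nodup_ofList c) (by simp [h])
          simp [this]
        · rw [if_neg (by simpa using h)]
          have : (PySem.Set.ofList c).count v = 0 := by
            rw [List.count_eq_zero]; simp [h]
          simp [this]
      rw [hcnt]; ring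

-- Swapping the order of summation: sum over communities of per-community neighbor counts
-- equals sum over neighbors of per-neighbor community counts.
theorem sum_swap (communities : List (List Int)) (neighbors : List Int) :
    (communities.map (fun c =>
        (neighbors.map (fun n => if c.contains n then (1 : Int) else 0)).sum)).sum
      = (neighbors.map (fun n =>
          (communities.map (fun c => if c.contains n then (1 : Int) else 0)).sum)).sum := by
  induction communities with
  | nil => simp
  | cons c cs ih =>
      simp only [List.map_cons, List.sum_cons, ih]
      rw [← List.sum_map_add]

-- ===== VERDICT (by name: the statement is the Claim_ definition above) =====
theorem calculate_kis_spec : Claim_equal_calculate_kis := by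
  intro communities neighbors _
  show calculate_kis communities neighbors = calculate_kis_alt communities neighbors
  simp only [calculate_kis, calculate_kis_alt]
  rw [PySem.List.foldl_add, PySem.List.foldl_add]
  simp only [kis_inner_eq, count_getD, zero_add]
  simp only [PySem.Dict.getD, PySem.Dict.get?, PySem.Dict.empty, List.find?_nil, Option.map_none, Option.getD_none, zero_add]
  exact sum_swap communities neighbors
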